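-- pv_equiv track=rewrite | github.com/leekcummings/finals-scheduler | old_code.py | checkRepeatedStudents
-- ===== SOURCE A (Python) =====
-- def checkRepeatedStudents(students, schedule, c, i):
--     # Keep track of all student sets and number of students
--     scheduledStudents = []
--     totalStudents = 0
--     # Students from unscheduled class
--     scheduledStudents.append(students[c])
--     totalStudents += len(students[c])
--
--     for otherCourse in schedule[i]:
--         # Students from previously scheduled classes
--         scheduledStudents.append(students[otherCourse])
--         totalStudents += len(students[otherCourse])
--
--     # If the union of all student sets has repeats,
--     # it will be smaller than the total number of students
--     if len(set.union(*scheduledStudents)) < totalStudents: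
--         # Repeats found
--         return True
--     # No repeats found
--     return False
-- ===== SOURCE B (Python) =====
-- def checkRepeatedStudents(students, schedule, c, i):
--     # Incremental collision detection: grow a 'seen' set, bail out on first overlap.
--     seen = set()
--     for course in [c, *schedule[i]]:
--         group = students[course]
--         if not seen.isdisjoint(group):
--             return True
--         seen.update(group)
--     return False
-- ===== Notes on version B (the rewrite author's own statement) =====
-- stated objective: simpler
-- what changed: Replaces A's collect-all-sets, sum-the-sizes and compare-with-union-cardinality pass by an incremental collision detector that grows one seen set and returns True on the first course whose students intersect it.
import Mathlib
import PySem

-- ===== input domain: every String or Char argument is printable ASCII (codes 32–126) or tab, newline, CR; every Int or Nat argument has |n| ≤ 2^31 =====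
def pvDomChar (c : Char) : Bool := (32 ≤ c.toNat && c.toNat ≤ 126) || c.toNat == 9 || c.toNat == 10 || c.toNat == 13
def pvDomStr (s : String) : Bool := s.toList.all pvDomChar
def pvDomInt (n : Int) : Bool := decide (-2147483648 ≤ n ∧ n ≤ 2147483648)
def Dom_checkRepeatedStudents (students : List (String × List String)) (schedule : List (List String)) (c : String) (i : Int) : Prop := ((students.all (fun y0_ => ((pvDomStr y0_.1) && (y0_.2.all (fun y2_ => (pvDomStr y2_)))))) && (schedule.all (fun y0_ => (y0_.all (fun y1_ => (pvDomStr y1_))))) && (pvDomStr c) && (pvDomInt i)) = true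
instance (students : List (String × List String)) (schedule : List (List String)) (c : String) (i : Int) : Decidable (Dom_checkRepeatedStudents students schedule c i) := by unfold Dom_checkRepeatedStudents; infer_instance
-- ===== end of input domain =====

-- B replaces A's "collect all sets, compare union size with summed sizes" by an incremental
-- seen-set collision detector with early exit (objective: simpler).

-- ===== PORT A =====
def checkRepeatedStudents (students : List (String × List String)) (schedule : List (List String)) (c : String) (i : Int) : Bool :=
  -- scheduledStudents = [students[c]]; totalStudents = len(students[c])
  let scheduledStudents0 : List (List String) := [(PySem.Dict.mk students).getD c []]
  let totalStudents0 : Int := (((PySem.Dict.mk students).getD c []).length : Int)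
  -- for otherCourse in schedule[i]: append students[otherCourse]; add its len
  let st := (PySem.List.pyGetD schedule i []).foldl
      (fun (acc : List (List String) × Int) otherCourse =>
        (acc.1 ++ [(PySem.Dict.mk students).getD otherCourse []],
         acc.2 + (((PySem.Dict.mk students).getD otherCourse []).length : Int)))
      (scheduledStudents0, totalStudents0)
  -- len(set.union(*scheduledStudents)) < totalStudents
  decide (PySem.Set.len (match st.1 with
            | [] => []
            | h :: t => t.foldl PySem.Set.union h) < st.2)

-- ===== PORT B =====
-- the loop of Source B: grow `seen`, return True on the first course whose set meets it
def pvSeenLoop (students : List (String × List String)) (seen : PySem.Set String) : List String → Bool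
  | [] => false
  | course :: rest =>
    let group := (PySem.Dict.mk students).getD course []
    if !(PySem.Set.isdisjoint seen group) then true
    else pvSeenLoop students (PySem.Set.update seen group) rest

def checkRepeatedStudents_alt (students : List (String × List String)) (schedule : List (List String)) (c : String) (i : Int) : Bool :=
  pvSeenLoop students PySem.Set.empty (c :: PySem.List.pyGetD schedule i [])

-- ===== PRECONDITION & SPEC =====
-- Pre_ excludes inputs where the Python A raises — IndexError (i out of range of schedule) and
-- KeyError (c, or a course in schedule[i], missing from students) — and Lean inputs whose student
-- lists contain duplicates: students has Python type dict[str, set[str]], and a Python set cannot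
-- hold duplicates, so such lists encode no Python input.
def Pre_checkRepeatedStudents (students : List (String × List String)) (schedule : List (List String)) (c : String) (i : Int) : Prop :=
  PySem.Raise.InRange schedule.length i ∧
  (PySem.Dict.mk students).contains c = true ∧
  (∀ oc ∈ PySem.List.pyGetD schedule i [], (PySem.Dict.mk students).contains oc = true) ∧
  (∀ p ∈ students, p.2.Nodup)
instance (students : List (String × List String)) (schedule : List (List String)) (c : String) (i : Int) : Decidable (Pre_checkRepeatedStudents students schedule c i) := by unfold Pre_checkRepeatedStudents; infer_instance

def pvWitness_checkRepeatedStudents : (List (String × List String)) × List (List String) × String × Int :=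
  ([("a", ["x", "y"]), ("b", ["y"])], [["b"]], "a", 0)

def Spec_checkRepeatedStudents (students : List (String × List String)) (schedule : List (List String)) (c : String) (i : Int) (out : Bool) : Prop := out = checkRepeatedStudents_alt students schedule c i
instance (students : List (String × List String)) (schedule : List (List String)) (c : String) (i : Int) (out : Bool) : Decidable (Spec_checkRepeatedStudents students schedule c i out) := by unfold Spec_checkRepeatedStudents; infer_instance

-- ===== CLAIM (what is proved, stated in full; the proofs are below) =====
def Claim_equal_checkRepeatedStudents : Prop := ∀ (students : List (String × List String)) (schedule : List (List String)) (c : String) (i : Int), Dom_checkRepeatedStudents students schedule c i → Pre_checkRepeatedStudents students schedule c i → Spec_checkRepeatedStudents students schedule c i (checkRepeatedStudents students schedule c i)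

-- ===== LEMMAS AND PROOFS =====

-- B's loop, reformulated over the list of looked-up student groups
def pvGoGroups (seen : PySem.Set String) : List (List String) → Bool
  | [] => false
  | g :: rest =>
    if !(PySem.Set.isdisjoint seen g) then true
    else pvGoGroups (PySem.Set.update seen g) rest

lemma pvSeenLoop_eq_goGroups (students : List (String × List String)) (seen : PySem.Set String) (courses : List String) :
    pvSeenLoop students seen courses = pvGoGroups seen (courses.map (fun oc => (PySem.Dict.mk students).getD oc [])) := by
  induction courses generalizing seen with
  | nil => rfl
  | cons h t ih => simp [pvSeenLoop, pvGoGroups, ih]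

lemma getD_mk_nodup (students : List (String × List String)) (k : String)
    (h : ∀ p ∈ students, p.2.Nodup) : ((PySem.Dict.mk students).getD k []).Nodup := by
  induction students with
  | nil => simp [PySem.Dict.getD, PySem.Dict.get?]
  | cons p rest ih =>
    rw [PySem.Dict.getD, PySem.Dict.get?_mk_cons]
    by_cases hk : p.1 == k
    · simp [hk]; exact h p (by simp)
    · simp [hk]
      have := ih (fun q hq => h q (by simp [hq]))
      simpa [PySem.Dict.getD] using this

lemma update_len_filter (g : List String) (s : PySem.Set String) (hg : g.Nodup) :
    (PySem.Set.update s g).length = s.length + (g.filter (fun x => !s.contains x)).length := by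
  induction g generalizing s with
  | nil => simp [PySem.Set.update]
  | cons x t ih =>
    have hxt : x ∉ t := (List.nodup_cons.mp hg).1
    have hnd : t.Nodup := (List.nodup_cons.mp hg).2
    by_cases hx : x ∈ s
    · have hstep : PySem.Set.update s (x :: t) = PySem.Set.update s t := by
        simp [PySem.Set.update, PySem.Set.add, hx]
      rw [hstep, ih s hnd]
      have hfc : (x :: t).filter (fun y => !s.contains y) = t.filter (fun y => !s.contains y) := by
        simp [hx]
      rw [hfc]
    · have hstep : PySem.Set.update s (x :: t) = PySem.Set.update (s ++ [x]) t := by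
        simp [PySem.Set.update, PySem.Set.add, hx]
      rw [hstep, ih (s ++ [x]) hnd]
      have hfilt : t.filter (fun y => !(s ++ [x]).contains y) = t.filter (fun y => !s.contains y) := by
        apply List.filter_congr
        intro y hy
        have h2 : ¬ y = x := fun h => hxt (h ▸ hy)
        simp [List.mem_append, h2]
      have hfc : (x :: t).filter (fun y => !s.contains y) = x :: t.filter (fun y => !s.contains y) := by
        simp [hx]
      rw [hfilt, hfc]
      simp only [List.length_append, List.length_cons, List.length_nil]
      omega

lemma foldl_update_len_le (L : List (List String)) (s : PySem.Set String)
    (h : ∀ g ∈ L, g.Nodup) :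
    (L.foldl PySem.Set.update s).length ≤ s.length + (L.map List.length).sum := by
  induction L generalizing s with
  | nil => simp
  | cons g rest ih =>
    have hlen := update_len_filter g s (h g (by simp))
    have hfle : (g.filter (fun x => !s.contains x)).length ≤ g.length := List.length_filter_le _ _
    have := ih (PySem.Set.update s g) (fun q hq => h q (by simp [hq]))
    simp only [List.foldl_cons, List.map_cons, List.sum_cons]
    omega

lemma core (L : List (List String)) (s : PySem.Set String) (h : ∀ g ∈ L, g.Nodup) :
    pvGoGroups s L = decide ((L.foldl PySem.Set.update s).length < s.length + (L.map List.length).sum) := by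
  induction L generalizing s with
  | nil => simp [pvGoGroups]
  | cons g rest ih =>
    have hgnd : g.Nodup := h g (by simp)
    have hlen := update_len_filter g s hgnd
    by_cases hd : PySem.Set.isdisjoint s g = true
    · -- disjoint: the filter keeps all of g
      have hall : ∀ x ∈ g, ¬ s.contains x = true := by
        intro x hx hc
        have := (PySem.Set.isdisjoint_iff s g).mp hd x (by simpa using hc)
        exact this hx
      have hfilt : g.filter (fun x => !s.contains x) = g := by
        apply List.filter_eq_self.mpr
        intro x hx; simpa using hall x hx
      have hlen' : (PySem.Set.update s g).length = s.length + g.length := by rw [hlen, hfilt]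
      have := ih (PySem.Set.update s g) (fun q hq => h q (by simp [hq]))
      simp only [pvGoGroups, hd, Bool.not_true, Bool.false_eq_true, if_false, List.foldl_cons,
        List.map_cons, List.sum_cons]
      rw [this, hlen']
      congr 1
      simp
      omega
    · -- overlap: some element of g is already in s, so the final size stays below the total
      have hany : s.any (fun x => PySem.Set.contains g x) = true := by
        cases hval : s.any (fun x => PySem.Set.contains g x) with
        | true => rfl
        | false => exact absurd (by simp only [PySem.Set.isdisjoint, hval, Bool.not_false]) hd
      have hex : ∃ x ∈ g, s.contains x = true := by
        obtain ⟨x, hxs, hxg⟩ := List.any_eq_true.mp hany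
        exact ⟨x, by simpa [PySem.Set.contains] using hxg, by simpa using hxs⟩
      have hflt : (g.filter (fun x => !s.contains x)).length < g.length := by
        obtain ⟨x, hxg, hxs⟩ := hex
        by_contra hcon
        have hle := List.length_filter_le (fun x => !s.contains x) g
        have heq : (g.filter (fun x => !s.contains x)).length = g.length := by omega
        have hall := (List.length_filter_eq_length_iff).mp heq x hxg
        rw [hxs] at hall
        simp at hall
      have hlt : (PySem.Set.update s g).length < s.length + g.length := by omega
      have hbound := foldl_update_len_le rest (PySem.Set.update s g) (fun q hq => h q (by simp [hq]))
      simp only [pvGoGroups, hd, Bool.not_false, if_true, List.foldl_cons, List.map_cons,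
        List.sum_cons]
      have : (List.foldl PySem.Set.update (PySem.Set.update s g) rest).length
              < s.length + (g.length + (rest.map List.length).sum) := by omega
      simp [this]

lemma update_nil_of_nodup (g : List String) (hg : g.Nodup) : PySem.Set.update ([] : PySem.Set String) g = g := by
  suffices h : ∀ (s : PySem.Set String), (∀ x ∈ g, s.contains x = false) → PySem.Set.update s g = s ++ g by
    simpa using h [] (by simp)
  induction g with
  | nil => intro s _; simp [PySem.Set.update]
  | cons x t ih =>
    intro s hs
    have hxt : x ∉ t := (List.nodup_cons.mp hg).1
    have hxs : x ∉ s := by simpa using hs x (by simp)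
    have hstep : PySem.Set.update s (x :: t) = PySem.Set.update (s ++ [x]) t := by
      simp [PySem.Set.update, PySem.Set.add, hxs]
    rw [hstep, ih (List.nodup_cons.mp hg).2 (s ++ [x]) ?_]
    · simp
    · intro y hy
      have h1 : y ∉ s := by simpa using hs y (by simp [hy])
      have h2 : ¬ y = x := fun h => hxt (h ▸ hy)
      simp [h1, h2]

lemma foldl_pair_append_sum (f : String → List String) (row : List String)
    (l : List (List String)) (t : Int) :
    row.foldl (fun (acc : List (List String) × Int) x => (acc.1 ++ [f x], acc.2 + ((f x).length : Int))) (l, t)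
    = (l ++ row.map f, t + ((((row.map f).map List.length).sum : Nat) : Int)) := by
  induction row generalizing l t with
  | nil => simp
  | cons h r ih =>
    simp only [List.foldl_cons, ih, List.map_cons, List.sum_cons, Prod.mk.injEq]
    refine ⟨by simp, by push_cast; ring⟩

-- ===== VERDICT (by name: the statement is the Claim_ definition above) =====
theorem checkRepeatedStudents_spec : Claim_equal_checkRepeatedStudents := by
  intro students schedule c i _ hpre
  obtain ⟨_, _, _, hnd⟩ := hpre
  unfold Spec_checkRepeatedStudents checkRepeatedStudents_alt
  rw [pvSeenLoop_eq_goGroups]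
  simp only [checkRepeatedStudents, List.map_cons]
  rw [foldl_pair_append_sum (fun oc => (PySem.Dict.mk students).getD oc [])]
  have hnodupAll : ∀ g ∈ (((PySem.Dict.mk students).getD c []) ::
      (PySem.List.pyGetD schedule i []).map (fun oc => (PySem.Dict.mk students).getD oc [])), g.Nodup := by
    intro g hg
    rcases List.mem_cons.mp hg with h | h
    · exact h ▸ getD_mk_nodup students c hnd
    · obtain ⟨oc, _, rfl⟩ := List.mem_map.mp h
      exact getD_mk_nodup students oc hnd
  rw [core _ _ hnodupAll]
  simp only [List.singleton_append, List.foldl_cons, PySem.Set.len, List.map_cons, List.sum_cons,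
    List.length_nil, Nat.zero_add, PySem.Set.empty]
  rw [update_nil_of_nodup _ (hnodupAll _ (by simp))]
  rw [decide_eq_decide]
  show ((List.foldl PySem.Set.union _ _).length : Int) < _ ↔ _
  rw [show (PySem.Set.union : PySem.Set String → PySem.Set String → PySem.Set String) = PySem.Set.update from rfl]
  omega
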